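-- pv_equiv track=rewrite | github.com/AleksandraTsygantsova/AlgorithmsCourse | lesson4/task1.py | find_max_neg_fst
-- ===== SOURCE A (Python) =====
-- def find_max_neg_fst(array):
--     neg_array = []
--     for i in array:
--         if i < 0:
--             neg_array.append(i)
--
--     max_neg = neg_array[0]
--     for i in neg_array:
--         if i < max_neg:
--             max_neg = i
--
--     max_neg_idx = neg_array.index(max_neg)
--     return max_neg, max_neg_idx
-- ===== SOURCE B (Python) =====
-- def find_max_neg_fst(array):
--     min_neg = 0
--     min_idx = 0
--     count = 0
--     for x in array:
--         if x < 0: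
--             if count == 0 or x < min_neg:
--                 min_neg = x
--                 min_idx = count
--             count += 1
--     if count == 0:
--         raise IndexError("no negative values in array")
--     return min_neg, min_idx
-- ===== Notes on version B (the rewrite author's own statement) =====
-- stated objective: simpler
-- what changed: Replaces A's three sequential passes (build the negatives list, scan it for the minimum, scan it again with .index) by one fused pass over the input that maintains the running minimum, its index among negatives, and a negative counter, allocating no intermediate list.
import Mathlib
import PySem

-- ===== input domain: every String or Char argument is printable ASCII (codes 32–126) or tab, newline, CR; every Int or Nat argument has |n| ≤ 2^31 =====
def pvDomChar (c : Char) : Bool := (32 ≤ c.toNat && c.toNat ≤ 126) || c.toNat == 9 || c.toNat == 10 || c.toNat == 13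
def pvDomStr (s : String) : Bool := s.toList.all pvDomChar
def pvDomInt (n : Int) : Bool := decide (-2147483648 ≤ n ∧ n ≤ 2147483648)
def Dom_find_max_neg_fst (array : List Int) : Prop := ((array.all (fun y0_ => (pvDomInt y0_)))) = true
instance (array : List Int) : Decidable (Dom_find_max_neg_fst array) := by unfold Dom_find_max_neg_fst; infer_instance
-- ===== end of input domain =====

-- B fuses A's three passes (filter, min-scan, .index scan) into one pass with a running
-- minimum, its index among negatives, and a negative counter; objective: simpler.


-- ===== PORT A =====
def find_max_neg_fst (array : List Int) : Int × Int :=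
  let neg_array := array.foldl (fun acc i => if i < 0 then acc ++ [i] else acc) []
  match neg_array with
  | [] => (0, 0)  -- Python raises IndexError at neg_array[0]; excluded by Pre_
  | h :: _ =>
    let max_neg := neg_array.foldl (fun m i => if i < m then i else m) h
    let max_neg_idx : Int := (((PySem.List.index? neg_array max_neg).getD 0 : Nat) : Int)
    (max_neg, max_neg_idx)

-- ===== PORT B =====
-- B's loop body: state (min_neg, min_idx, count)
def fmnStep (s : Int × Int × Int) (x : Int) : Int × Int × Int :=
  if x < 0 then
    if s.2.2 == 0 || x < s.1 then (x, s.2.2, s.2.2 + 1) else (s.1, s.2.1, s.2.2 + 1)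
  else s

def find_max_neg_fst_alt (array : List Int) : Int × Int :=
  let s := array.foldl fmnStep (0, 0, 0)
  if s.2.2 == 0 then (0, 0)  -- Python B raises IndexError here; excluded by Pre_
  else (s.1, s.2.1)

-- ===== PRECONDITION & SPEC =====
-- Pre_ excludes exactly the arrays with no negative element, on which Python A raises
-- IndexError at neg_array[0] (and Python B raises IndexError too).
def Pre_find_max_neg_fst (array : List Int) : Prop := ∃ x ∈ array, x < 0
instance (array : List Int) : Decidable (Pre_find_max_neg_fst array) := by unfold Pre_find_max_neg_fst; infer_instance
def pvWitness_find_max_neg_fst : List Int := [3, -2, 5, -7, -2]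

def Spec_find_max_neg_fst (array : List Int) (out : Int × Int) : Prop := out = find_max_neg_fst_alt array
instance (array : List Int) (out : Int × Int) : Decidable (Spec_find_max_neg_fst array out) := by unfold Spec_find_max_neg_fst; infer_instance

-- ===== CLAIM (what is proved, stated in full; the proofs are below) =====
def Claim_equal_find_max_neg_fst : Prop := ∀ (array : List Int), Dom_find_max_neg_fst array → Pre_find_max_neg_fst array → Spec_find_max_neg_fst array (find_max_neg_fst array)

-- ===== LEMMAS AND PROOFS =====

-- abstract recursion of B's loop after the first negative has been seen
def minFst : List Int → Int → Int → Int → Int × Int × Int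
  | [], m, i, c => (m, i, c)
  | x :: t, m, i, c => if x < m then minFst t x c (c + 1) else minFst t m i (c + 1)

-- B's fold skips non-negative elements, so it equals the fold over the filtered list
lemma foldl_skip_nonneg (l : List Int) (s : Int × Int × Int) :
    l.foldl fmnStep s = (l.filter (fun i => decide (i < 0))).foldl fmnStep s := by
  induction l generalizing s with
  | nil => rfl
  | cons x t ih =>
    by_cases hx : x < 0
    · rw [List.foldl_cons, List.filter_cons, if_pos (by simpa using hx), List.foldl_cons]
      exact ih _
    · rw [List.foldl_cons, List.filter_cons, if_neg (by simpa using hx)]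
      have hs : fmnStep s x = s := by simp [fmnStep, hx]
      rw [hs]; exact ih _

-- with a positive counter the `count == 0` test is dead and the loop is minFst
lemma foldl_eq_minFst (t : List Int) : ∀ (m i c : Int), 1 ≤ c → (∀ x ∈ t, x < 0) →
    t.foldl fmnStep (m, i, c) = minFst t m i c := by
  induction t with
  | nil => intro m i c _ _; rfl
  | cons x t ih =>
    intro m i c hc hneg
    have hx : x < 0 := hneg x (by simp)
    have hc0 : (c == 0) = false := beq_eq_false_iff_ne.mpr (by omega)
    have ht : ∀ y ∈ t, y < 0 := fun y hy => hneg y (by simp [hy])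
    rw [List.foldl_cons]
    have hstep : fmnStep (m, i, c) x = if x < m then (x, c, c + 1) else (m, i, c + 1) := by
      simp [fmnStep, hx, hc0]
    rw [hstep]
    by_cases hxm : x < m
    · rw [if_pos hxm]
      simp only [minFst, if_pos hxm]
      exact ih x c (c + 1) (by omega) ht
    · rw [if_neg hxm]
      simp only [minFst, if_neg hxm]
      exact ih m i (c + 1) (by omega) ht

-- invariant of B's loop: it carries the minimum of the processed prefix, the first
-- index of that minimum, and the number of elements processed
lemma minFst_spec (t : List Int) : ∀ (pre : List Int) (m : Int) (k : Nat) (i c : Int),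
    (∀ y ∈ pre, m ≤ y) → PySem.List.index? pre m = some k →
    i = (k : Int) → c = (pre.length : Int) →
    ∃ j : Nat,
      PySem.List.index? (pre ++ t) (t.foldl (fun a x => if x < a then x else a) m) = some j ∧
      (minFst t m i c).1 = t.foldl (fun a x => if x < a then x else a) m ∧
      (minFst t m i c).2.1 = (j : Int) ∧
      (minFst t m i c).2.2 = c + (t.length : Int) := by
  induction t with
  | nil =>
    intro pre m k i c hlb hidx hi hc
    exact ⟨k, by simpa using hidx, by simp [minFst], by simp [minFst, hi], by simp [minFst]⟩
  | cons x t ih =>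
    intro pre m k i c hlb hidx hi hc
    have hm_mem : m ∈ pre := by
      have h1 : (PySem.List.index? pre m).isSome = true := by rw [hidx]; rfl
      exact (PySem.List.index?_isSome_iff pre m).mp h1
    by_cases hxm : x < m
    · have hx_not : x ∉ pre := fun hx => absurd (hlb x hx) (by omega)
      have hidx' : PySem.List.index? (pre ++ [x]) x = some pre.length :=
        PySem.List.index?_append_singleton_self pre x hx_not
      have hlb' : ∀ y ∈ pre ++ [x], x ≤ y := by
        intro y hy
        rcases List.mem_append.mp hy with h | h
        · exact le_of_lt (lt_of_lt_of_le hxm (hlb y h))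
        · simp at h; omega
      obtain ⟨j, hj1, hj2, hj3, hj4⟩ := ih (pre ++ [x]) x pre.length c (c + 1) hlb' hidx'
        hc (by simp [hc])
      have hfold : (x :: t).foldl (fun a x => if x < a then x else a) m
          = t.foldl (fun a x => if x < a then x else a) x := by
        rw [List.foldl_cons, if_pos hxm]
      refine ⟨j, ?_, ?_, ?_, ?_⟩
      · rw [hfold]; simpa [List.append_assoc] using hj1
      · simp only [minFst, if_pos hxm]; rw [hfold]; exact hj2
      · simp only [minFst, if_pos hxm]; exact hj3
      · simp only [minFst, if_pos hxm]; rw [hj4]; simp; omega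
    · have hidx' : PySem.List.index? (pre ++ [x]) m = some k := by
        rw [PySem.List.index?_append_of_mem _ hm_mem]; exact hidx
      have hlb' : ∀ y ∈ pre ++ [x], m ≤ y := by
        intro y hy
        rcases List.mem_append.mp hy with h | h
        · exact hlb y h
        · simp at h; omega
      obtain ⟨j, hj1, hj2, hj3, hj4⟩ := ih (pre ++ [x]) m k i (c + 1) hlb' hidx'
        hi (by simp [hc])
      have hfold : (x :: t).foldl (fun a x => if x < a then x else a) m
          = t.foldl (fun a x => if x < a then x else a) m := by
        rw [List.foldl_cons, if_neg hxm]
      refine ⟨j, ?_, ?_, ?_, ?_⟩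
      · rw [hfold]; simpa [List.append_assoc] using hj1
      · simp only [minFst, if_neg hxm]; rw [hfold]; exact hj2
      · simp only [minFst, if_neg hxm]; exact hj3
      · simp only [minFst, if_neg hxm]; rw [hj4]; simp; omega

-- ===== VERDICT (by name: the statement is the Claim_ definition above) =====
theorem find_max_neg_fst_spec : Claim_equal_find_max_neg_fst := by
  intro array _ hpre
  obtain ⟨x0, hx0mem, hx0⟩ := hpre
  unfold Spec_find_max_neg_fst find_max_neg_fst find_max_neg_fst_alt
  rw [PySem.List.foldl_append_ite_eq_filter, foldl_skip_nonneg]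
  have hne : array.filter (fun i => decide (i < 0)) ≠ [] := by
    simp [List.filter_eq_nil_iff]
    exact ⟨x0, hx0mem, hx0⟩
  obtain ⟨h, t, hht⟩ := List.exists_cons_of_ne_nil hne
  have hallneg : ∀ y ∈ array.filter (fun i => decide (i < 0)), y < 0 := by
    intro y hy; simpa using (List.of_mem_filter hy)
  rw [hht]
  simp only [List.nil_append]
  have hh : h < 0 := hallneg h (by rw [hht]; simp)
  have ht : ∀ y ∈ t, y < 0 := fun y hy => hallneg y (by rw [hht]; simp [hy])
  -- B side: the first step of the loop produces state (h, 0, 1), then minFst takes over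
  have hstep1 : List.foldl fmnStep (0, 0, 0) (h :: t) = minFst t h 0 1 := by
    rw [List.foldl_cons]
    have h1 : fmnStep (0, 0, 0) h = (h, 0, 1) := by simp [fmnStep, hh]
    rw [h1]
    exact foldl_eq_minFst t h 0 1 (by omega) ht
  obtain ⟨j, hj1, hj2, hj3, hj4⟩ := minFst_spec t [h] h 0 0 1
    (by simp) (PySem.List.index?_cons_self h []) (by simp) (by simp)
  -- A side: the min-fold over h :: t starting at h is the fold over t starting at h
  have hAfold : (h :: t).foldl (fun m i => if i < m then i else m) h
      = t.foldl (fun a x => if x < a then x else a) h := by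
    rw [List.foldl_cons, if_neg (lt_irrefl h)]
  have hsingle : ([h] : List Int) ++ t = h :: t := rfl
  rw [hsingle] at hj1
  have hcount : ((minFst t h 0 1).2.2 == 0) = false := by
    rw [hj4]; exact beq_eq_false_iff_ne.mpr (by have := Int.natCast_nonneg t.length; omega)
  simp only [hstep1, hcount, Bool.false_eq_true, if_false]
  rw [hAfold, hj1]
  simp [hj2, hj3]
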